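-- pv_equiv track=rewrite | github.com/wpedrak/advent_of_code_2018 | 05/solution2.py | check_polymer_size
-- ===== SOURCE A (Python) =====
-- def will_react(u1, u2):
--     return u1 != u2 and u1.upper() == u2.upper()
--
-- def check_polymer_size(polymer):
--     left_stack = list(polymer)
--     right_stack = []
--
--     while left_stack:
--         left_unit = left_stack.pop()
--
--         if not right_stack:
--             right_stack.append(left_unit)
--             continue
--
--         right_unit = right_stack.pop()
--
--         if not will_react(left_unit, right_unit):
--             right_stack.append(right_unit)
--             right_stack.append(left_unit)
--
--     return len(right_stack)
-- ===== SOURCE B (Python) =====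
-- def will_react(u1, u2):
--     return u1 != u2 and u1.upper() == u2.upper()
--
--
-- def check_polymer_size(polymer):
--     units = list(polymer)
--     changed = True
--     while changed:
--         changed = False
--         out = []
--         i = 0
--         while i < len(units):
--             if i + 1 < len(units) and will_react(units[i], units[i + 1]):
--                 i += 2
--                 changed = True
--             else:
--                 out.append(units[i])
--                 i += 1
--         units = out
--     return len(units)
-- ===== Notes on version B (the rewrite author's own statement) =====
-- stated objective: alternative
-- what changed: Replaces the single-stack cancellation (pop units off the input end, cancel against an output stack) by a naive fixpoint iteration: repeated left-to-right passes that drop non-overlapping adjacent reacting pairs until a pass removes nothing; the results agree because the reduction is confluent.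
import Mathlib
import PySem

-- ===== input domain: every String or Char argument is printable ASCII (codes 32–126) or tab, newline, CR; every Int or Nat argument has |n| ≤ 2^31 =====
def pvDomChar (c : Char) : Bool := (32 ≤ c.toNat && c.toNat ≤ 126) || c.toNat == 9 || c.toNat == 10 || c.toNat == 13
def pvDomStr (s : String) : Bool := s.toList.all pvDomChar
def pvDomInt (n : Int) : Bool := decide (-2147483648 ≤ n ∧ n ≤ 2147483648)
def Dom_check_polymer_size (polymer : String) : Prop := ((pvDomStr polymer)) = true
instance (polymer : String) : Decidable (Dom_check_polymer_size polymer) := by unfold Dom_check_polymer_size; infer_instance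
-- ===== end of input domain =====

-- B replaces A's single output stack by repeated whole-list scan passes (fixpoint of
-- one-pass pair removal); same return value, proved via confluence of the reduction.

-- ===== PORT A =====
def will_react (u1 u2 : Char) : Bool :=
  (u1 != u2) && (PySem.Chars.upperChar u1 == PySem.Chars.upperChar u2)

-- the while loop of A: pop from the END of left_stack, react against the top of
-- right_stack (right_stack is kept top-first)
def checkLoopA : List Char → List Char → List Char
  | [], rs => rs
  | l :: t, [] => checkLoopA (l :: t).dropLast [t.getLastD l]
  | l :: t, ru :: rs' =>
    if !(will_react (t.getLastD l) ru) then
      checkLoopA (l :: t).dropLast ((t.getLastD l) :: ru :: rs')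
    else
      checkLoopA (l :: t).dropLast rs'
termination_by ls _ => ls.length
decreasing_by all_goals simp [List.length_dropLast]

def check_polymer_size (polymer : String) : Int :=
  ((checkLoopA polymer.toList []).length : Int)

-- ===== PORT B =====
-- one left-to-right pass: drop non-overlapping adjacent reacting pairs, flag any change
def passB : List Char → List Char × Bool
  | [] => ([], false)
  | [a] => ([a], false)
  | a :: b :: t =>
    if will_react a b then ((passB t).1, true)
    else ((a :: (passB (b :: t)).1), (passB (b :: t)).2)

-- termination helpers for loopB (cited in its decreasing_by)
theorem passB_le (s : List Char) : (passB s).1.length ≤ s.length := by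
  induction s using passB.induct with
  | case1 => simp [passB]
  | case2 a => simp [passB]
  | case3 a b t hr ih =>
    simp only [passB, hr, if_true, List.length_cons] at ih ⊢
    omega
  | case4 a b t hr ih =>
    simp only [passB, hr, if_false, Bool.false_eq_true, List.length_cons] at ih ⊢
    omega

theorem passB_lt (s : List Char) (h : (passB s).2 = true) :
    (passB s).1.length < s.length := by
  induction s using passB.induct with
  | case1 => simp [passB] at h
  | case2 a => simp [passB] at h
  | case3 a b t hr ih =>
    have hle := passB_le t
    simp only [passB, hr, if_true, List.length_cons]
    omega
  | case4 a b t hr ih =>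
    simp only [passB, hr, if_false, Bool.false_eq_true] at h ⊢
    have := ih h
    simp only [List.length_cons] at this ⊢
    omega

-- repeat passes until a pass changes nothing
def loopB (units : List Char) : List Char :=
  let r := passB units
  if _h : r.2 = true then loopB r.1 else r.1
termination_by units.length
decreasing_by exact passB_lt units _h

def check_polymer_size_alt (polymer : String) : Int :=
  ((loopB polymer.toList).length : Int)

-- ===== PRECONDITION & SPEC =====
def Spec_check_polymer_size (polymer : String) (out : Int) : Prop := out = check_polymer_size_alt polymer
instance (polymer : String) (out : Int) : Decidable (Spec_check_polymer_size polymer out) := by unfold Spec_check_polymer_size; infer_instance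

-- ===== CLAIM (what is proved, stated in full; the proofs are below) =====
def Claim_equal_check_polymer_size : Prop := ∀ (polymer : String), Dom_check_polymer_size polymer → Spec_check_polymer_size polymer (check_polymer_size polymer)

-- ===== LEMMAS AND PROOFS =====

-- the one-step stack transition of A
def stepR (rs : List Char) (c : Char) : List Char :=
  match rs with
  | [] => [c]
  | r :: t => if will_react c r then t else c :: r :: t

-- fully reduced: no adjacent reacting pair
def NR : List Char → Prop
  | [] => True
  | [_] => True
  | a :: b :: t => will_react a b = false ∧ NR (b :: t)

-- A's stack result as a fold over the reversed input
def RA (s : List Char) : List Char := s.reverse.foldl stepR []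

theorem islower_iff (c : Char) :
    PySem.Chars.islower c = true ↔ (97 ≤ c.toNat ∧ c.toNat ≤ 122) := by
  rw [PySem.Chars.islower]
  rw [Bool.and_eq_true, decide_eq_true_iff, decide_eq_true_iff, Char.le_def, Char.le_def,
    UInt32.le_iff_toNat_le, UInt32.le_iff_toNat_le]
  exact Iff.rfl

theorem ofNat_toNat' (n : Nat) (h : n < 55296) : (Char.ofNat n).toNat = n := by
  simp [Char.ofNat, Char.toNat, Char.ofNatAux, Nat.isValidChar, h]

theorem toNat_upperChar (c : Char) :
    (PySem.Chars.upperChar c).toNat =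
      if 97 ≤ c.toNat ∧ c.toNat ≤ 122 then c.toNat - 32 else c.toNat := by
  by_cases h : 97 ≤ c.toNat ∧ c.toNat ≤ 122
  · rw [if_pos h, PySem.Chars.upperChar, if_pos ((islower_iff c).mpr h)]
    exact ofNat_toNat' _ (by omega)
  · rw [if_neg h, PySem.Chars.upperChar, if_neg (fun hl => h ((islower_iff c).mp hl))]

theorem char_eq_of_toNat (a b : Char) (h : a.toNat = b.toNat) : a = b :=
  Char.ext (UInt32.toNat_inj.mp h)

-- two units that react are case-partners: b's reacting partner is uniquely determined
theorem react_unique (a b h : Char) (hab : will_react a b = true)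
    (hbh : will_react b h = true) : h = a := by
  simp only [will_react, Bool.and_eq_true, bne_iff_ne, beq_iff_eq] at hab hbh
  have hab1 : a.toNat ≠ b.toNat := fun e => hab.1 (char_eq_of_toNat a b e)
  have hbh1 : b.toNat ≠ h.toNat := fun e => hbh.1 (char_eq_of_toNat b h e)
  have e1 := congrArg Char.toNat hab.2
  have e2 := congrArg Char.toNat hbh.2
  rw [toNat_upperChar, toNat_upperChar] at e1 e2
  apply char_eq_of_toNat
  split_ifs at e1 e2 <;> omega

theorem stepR_pres (rs : List Char) (c : Char) (h : NR rs) : NR (stepR rs c) := by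
  match rs with
  | [] => simp [stepR, NR]
  | [r] =>
    simp only [stepR]
    split_ifs with hr
    · simp [NR]
    · simpa [NR] using hr
  | r :: r' :: t =>
    simp only [stepR]
    split_ifs with hr
    · exact h.2
    · exact ⟨by simpa using hr, h⟩

theorem RA_cons (a : Char) (x : List Char) : RA (a :: x) = stepR (RA x) a := by
  simp [RA, List.reverse_cons, List.foldl_append]

theorem NR_RA (s : List Char) : NR (RA s) := by
  induction s with
  | nil => simp [RA, NR]
  | cons a x ih => rw [RA_cons]; exact stepR_pres _ _ ih

-- a reacting pair cancels against a fully reduced stack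
theorem cancel (rs : List Char) (a b : Char) (hnr : NR rs)
    (hab : will_react a b = true) : stepR (stepR rs b) a = rs := by
  match rs with
  | [] => simp [stepR, hab]
  | r :: t =>
    simp only [stepR]
    split_ifs with hbr
    · -- b reacts with the top r; then r = a and a does not react with the next unit
      have hra : r = a := react_unique a b r hab hbr
      match t with
      | [] => simp [hra]
      | h' :: t' =>
        have hnext : will_react r h' = false := hnr.1
        simp [hra ▸ hnext, hra]
    · simp [hab]

theorem RA_mid (u v : List Char) (a b : Char) (hab : will_react a b = true) :
    RA (u ++ a :: b :: v) = RA (u ++ v) := by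
  induction u with
  | nil =>
    simp only [List.nil_append]
    rw [RA_cons, RA_cons, cancel _ _ _ (NR_RA v) hab]
  | cons x u' ih =>
    simp only [List.cons_append]
    rw [RA_cons, RA_cons, ih]

theorem pass_RA (s : List Char) : RA (passB s).1 = RA s := by
  induction s using passB.induct with
  | case1 => simp [passB]
  | case2 a => simp [passB]
  | case3 a b t hr ih =>
    simp only [passB, hr, if_true]
    rw [ih]
    exact (RA_mid [] t a b hr).symm
  | case4 a b t hr ih =>
    simp only [passB, hr, if_false, Bool.false_eq_true]
    rw [RA_cons, ih, ← RA_cons]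

theorem pass_id (s : List Char) (h : (passB s).2 = false) : (passB s).1 = s := by
  induction s using passB.induct with
  | case1 => simp [passB]
  | case2 a => simp [passB]
  | case3 a b t hr ih => simp [passB, hr] at h
  | case4 a b t hr ih =>
    simp only [passB, hr, if_false, Bool.false_eq_true] at h ⊢
    rw [ih h]

theorem pass_NR (s : List Char) (h : (passB s).2 = false) : NR s := by
  induction s using passB.induct with
  | case1 => simp [NR]
  | case2 a => simp [NR]
  | case3 a b t hr ih => simp [passB, hr] at h
  | case4 a b t hr ih =>
    simp only [passB, hr, if_false, Bool.false_eq_true] at h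
    exact ⟨by simpa using hr, ih h⟩

theorem NR_tail (a : Char) (x : List Char) (h : NR (a :: x)) : NR x := by
  match x with
  | [] => simp [NR]
  | b :: t => exact h.2

theorem NR_RA_id (s : List Char) (h : NR s) : RA s = s := by
  induction s with
  | nil => simp [RA]
  | cons a x ih =>
    rw [RA_cons, ih (NR_tail a x h)]
    match x with
    | [] => simp [stepR]
    | h' :: t' => simp [stepR, h.1]

theorem loop_both (s : List Char) : NR (loopB s) ∧ RA (loopB s) = RA s := by
  by_cases h : (passB s).2 = true
  · have ih := loop_both (passB s).1
    rw [loopB]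
    simp only [h, dite_true]
    exact ⟨ih.1, ih.2.trans (pass_RA s)⟩
  · rw [loopB]
    simp only [h]
    rw [pass_id s (by simpa using h)]
    exact ⟨pass_NR s (by simpa using h), rfl⟩
termination_by s.length
decreasing_by exact passB_lt s h

theorem loopB_eq_RA (s : List Char) : loopB s = RA s := by
  have h := (loop_both s).2
  rw [NR_RA_id _ (loop_both s).1] at h
  exact h

theorem checkLoopA_concat (xs : List Char) (c : Char) (rs : List Char) :
    checkLoopA (xs ++ [c]) rs = checkLoopA xs (stepR rs c) := by
  match xs with
  | [] =>
    cases rs with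
    | nil => simp [checkLoopA, stepR]
    | cons r t =>
      by_cases h : will_react c r = true <;> simp [checkLoopA, stepR, h]
  | x :: xs' =>
    have hl : (xs' ++ [c]).getLastD x = c := by simp
    have hd : (x :: (xs' ++ [c])).dropLast = x :: xs' := by
      show ((x :: xs') ++ [c]).dropLast = x :: xs'
      rw [List.dropLast_concat]
    cases rs with
    | nil =>
      rw [checkLoopA.eq_def]
      show checkLoopA (x :: (xs' ++ [c])).dropLast [(xs' ++ [c]).getLastD x] =
        checkLoopA (x :: xs') (stepR [] c)
      rw [hl, hd]
      rfl
    | cons r t =>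
      rw [checkLoopA.eq_def]
      show (if (!will_react ((xs' ++ [c]).getLastD x) r) = true then
          checkLoopA (x :: (xs' ++ [c])).dropLast (((xs' ++ [c]).getLastD x) :: r :: t)
        else checkLoopA (x :: (xs' ++ [c])).dropLast t) =
        checkLoopA (x :: xs') (stepR (r :: t) c)
      rw [hl, hd]
      by_cases h : will_react c r = true <;> simp [stepR, h]

theorem checkLoopA_eq (ls rs : List Char) :
    checkLoopA ls rs = ls.reverse.foldl stepR rs := by
  induction ls using List.reverseRecOn generalizing rs with
  | nil => simp [checkLoopA]
  | append_singleton xs c ih =>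
    rw [checkLoopA_concat, ih, List.reverse_append]
    simp

-- ===== VERDICT (by name: the statement is the Claim_ definition above) =====
theorem check_polymer_size_spec : Claim_equal_check_polymer_size := by
  intro polymer _
  unfold Spec_check_polymer_size check_polymer_size check_polymer_size_alt
  rw [checkLoopA_eq, loopB_eq_RA]
  rfl
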